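-- pv_equiv track=rewrite | github.com/Camilo-6/SeptimoSemestre | Cr/Tareas/Tarea2/Ejercicio5/poli.py | mod_poli
-- ===== SOURCE A (Python) =====
-- def suma_poli(f, g, p_n):
--     if f == [0]:
--         return g
--     if g == [0]:
--         return f
--     l_1 = len(f)
--     l_2 = len(g)
--     if l_1 < l_2:
--         f = [0] * (l_2 - l_1) + f
--     elif l_2 < l_1:
--         g = [0] * (l_1 - l_2) + g
--     resultado = [(f[i] + g[i]) % p_n for i in range(max(l_1, l_2))]
--     while resultado and resultado[0] == 0:
--         resultado.pop(0)
--     if resultado == []: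
--         resultado = [0]
--     return resultado
--
-- def resta_poli(f, g, p_n):
--     if g == [0]:
--         return f
--     l_1 = len(f)
--     l_2 = len(g)
--     if l_1 < l_2:
--         f = [0] * (l_2 - l_1) + f
--     elif l_2 < l_1:
--         g = [0] * (l_1 - l_2) + g
--     resultado = [(f[i] - g[i]) % p_n for i in range(max(l_1, l_2))]
--     while resultado and resultado[0] == 0:
--         resultado.pop(0)
--     if resultado == []:
--         resultado = [0]
--     return resultado
--
-- def mult_poli(f, g, p_n):
--     l_1 = len(f)
--     l_2 = len(g)
--     if f == [0] or g == [0]: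
--         return [0]
--     if f == [1]:
--         return g
--     if g == [1]:
--         return f
--     resultado = [0] * (l_1 + l_2 - 1)
--     for i in range(l_1):
--         for j in range(l_2):
--             resultado[i + j] += f[i] * g[j]
--     resultado = [x % p_n for x in resultado]
--     while resultado and resultado[0] == 0:
--         resultado.pop(0)
--     if resultado == []:
--         resultado = [0]
--     return resultado
--
-- def div_poli(f, g, p_n):
--     if g == [0]:
--         raise ValueError("No se puede dividir por 0")
--     q = [0]
--     r = f[:]
--     while r != [0] and len(r) >= len(g):
--         lead_r = r[0]
--         lead_g = g[0]
--         if lead_g == 0: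
--             raise ValueError("No se puede dividir por 0")
--         coef = lead_r * pow(lead_g, -1, p_n) % p_n
--         t = [coef] + [0] * (len(r) - len(g))
--         while t and t[0] == 0:
--             t.pop(0)
--         if t == []:
--             t = [0]
--         q = suma_poli(q, t, p_n)
--         aux = mult_poli(t, g, p_n)
--         r = resta_poli(r, aux, p_n)
--     return q, r
--
-- def mod_poli(f, g, p_n):
--     if g == [0]:
--         raise ValueError("No se puede hacer modulo 0")
--     residuo = f[:]
--     l_1 = len(residuo)
--     l_2 = len(g)
--     if l_1 >= l_2:
--         _, residuo = div_poli(residuo, g, p_n)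
--     while residuo and residuo[0] == 0:
--         residuo.pop(0)
--     if residuo == []:
--         residuo = [0]
--     return residuo
-- ===== SOURCE B (Python) =====
-- def mod_poli(f, g, p_n):
--     if g == [0]:
--         raise ValueError("No se puede hacer modulo 0")
--     # in-place long division: no quotient, no polynomial mult/sub helpers;
--     # the leading term is cancelled by construction and simply dropped
--     r = f[:]
--     while r and r[0] == 0:
--         del r[0]
--     if r and len(r) >= len(g):
--         inv = pow(g[0], -1, p_n)
--         while r and len(r) >= len(g):
--             c = r[0] * inv % p_n
--             r = [(a - c * b) % p_n
--                  for a, b in zip(r[1:], g[1:] + [0] * (len(r) - len(g)))]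
--             while r and r[0] == 0:
--                 del r[0]
--     return r if r else [0]
-- ===== Notes on version B (the rewrite author's own statement) =====
-- stated objective: simpler
-- what changed: B replaces A's per-step construction of a quotient term and the generic suma/mult/resta polynomial helpers by direct long division: each step cancels the leading coefficient by construction (it is simply dropped) and subtracts c*g from the remainder tail in one zip pass, computing no quotient at all.
-- outside the precondition, e.g. on mod_poli([1, 0], [1], -5): A returns [0], B returns [0]; on mod_poli([3, 1, 2], [1, 1], -7): A returns [-3], B returns [-3]
import Mathlib
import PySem

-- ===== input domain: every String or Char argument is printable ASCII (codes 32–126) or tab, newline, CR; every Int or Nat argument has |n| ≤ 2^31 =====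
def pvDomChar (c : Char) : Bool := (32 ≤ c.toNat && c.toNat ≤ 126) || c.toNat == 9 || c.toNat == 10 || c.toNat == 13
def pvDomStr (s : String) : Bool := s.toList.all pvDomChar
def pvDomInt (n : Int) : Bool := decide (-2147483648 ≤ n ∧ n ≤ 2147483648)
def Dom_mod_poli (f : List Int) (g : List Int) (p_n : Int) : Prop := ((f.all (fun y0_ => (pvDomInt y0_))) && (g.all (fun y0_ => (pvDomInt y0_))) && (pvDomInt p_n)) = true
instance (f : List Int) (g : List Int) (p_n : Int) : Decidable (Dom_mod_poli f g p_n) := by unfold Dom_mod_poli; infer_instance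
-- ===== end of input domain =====

-- B replaces A's per-step quotient-term construction and generic suma/mult/resta polynomial
-- helpers by direct long division (leading term cancelled by construction and dropped, tail
-- updated in one zip pass, no quotient computed) — a simpler, self-contained loop.

-- ===== PORT A =====
-- shared builtin helper: Python's pow(a, -1, p_n) — modular inverse via Mathlib's extended gcd;
-- exact for 2 ≤ p_n and gcd(a, p_n) = 1, which Pre_ guarantees wherever either Python calls pow.
def pyInvMod (a p : Int) : Int :=
  PySem.Int.mod (Nat.gcdA (PySem.Int.mod a p).natAbs p.natAbs) p

-- "while l and l[0] == 0: l.pop(0)"  (an idiom both Pythons contain)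
def pyStrip : List Int → List Int
  | [] => []
  | x :: t => if x = 0 then pyStrip t else x :: t

-- "if l == []: l = [0]"  /  "return r if r else [0]"
def pyFix (l : List Int) : List Int := if l = [] then [0] else l

def suma_poli (f g : List Int) (p_n : Int) : List Int :=
  if f = [0] then g
  else if g = [0] then f
  else
    let l_1 := f.length
    let l_2 := g.length
    let f' := if l_1 < l_2 then List.replicate (l_2 - l_1) 0 ++ f else f
    let g' := if l_2 < l_1 then List.replicate (l_1 - l_2) 0 ++ g else g
    -- f[i], g[i]: after padding both lists have length max l_1 l_2, so getD's default is never used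
    let resultado := (List.range (max l_1 l_2)).map
      (fun i => PySem.Int.mod (f'.getD i 0 + g'.getD i 0) p_n)
    pyFix (pyStrip resultado)

def resta_poli (f g : List Int) (p_n : Int) : List Int :=
  if g = [0] then f
  else
    let l_1 := f.length
    let l_2 := g.length
    let f' := if l_1 < l_2 then List.replicate (l_2 - l_1) 0 ++ f else f
    let g' := if l_2 < l_1 then List.replicate (l_1 - l_2) 0 ++ g else g
    let resultado := (List.range (max l_1 l_2)).map
      (fun i => PySem.Int.mod (f'.getD i 0 - g'.getD i 0) p_n)
    pyFix (pyStrip resultado)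

def mult_poli (f g : List Int) (p_n : Int) : List Int :=
  let l_1 := f.length
  let l_2 := g.length
  if f = [0] ∨ g = [0] then [0]
  else if f = [1] then g
  else if g = [1] then f
  else
    -- "resultado[i+j] += f[i] * g[j]": indices are always in range, getD's default never used
    let res := (List.range l_1).foldl (fun acc i =>
      (List.range l_2).foldl (fun acc j =>
        acc.set (i + j) (acc.getD (i + j) 0 + f.getD i 0 * g.getD j 0)) acc)
      (List.replicate (l_1 + l_2 - 1) 0)
    pyFix (pyStrip (res.map (fun x => PySem.Int.mod x p_n)))

-- the while loop of div_poli; fuel only makes it total (inside Pre_ the remainder's length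
-- strictly decreases each pass, so fuel f.length + 1 is never exhausted).
-- r[0] / g[0] are headD: inside the loop both lists are nonempty on Pre_ (g[0] = 0 or a
-- non-invertible g[0] is a Python raise, excluded by Pre_).
def divLoop (p_n : Int) (g : List Int) : Nat → List Int → List Int → List Int × List Int
  | 0, q, r => (q, r)
  | fuel + 1, q, r =>
    if r ≠ [0] ∧ g.length ≤ r.length then
      let lead_r := r.headD 0
      let lead_g := g.headD 0
      let coef := PySem.Int.mod (lead_r * pyInvMod lead_g p_n) p_n
      let t := pyFix (pyStrip (coef :: List.replicate (r.length - g.length) 0))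
      let q' := suma_poli q t p_n
      let aux := mult_poli t g p_n
      let r' := resta_poli r aux p_n
      divLoop p_n g fuel q' r'
    else (q, r)

def div_poli (f g : List Int) (p_n : Int) : List Int × List Int :=
  -- g == [0] is a Python ValueError here, excluded by Pre_
  divLoop p_n g (f.length + 1) [0] f

def mod_poli (f : List Int) (g : List Int) (p_n : Int) : List Int :=
  -- g == [0] is a Python ValueError here, excluded by Pre_
  let residuo := f
  let residuo := if g.length ≤ residuo.length then (div_poli residuo g p_n).2 else residuo
  pyFix (pyStrip residuo)

-- ===== PORT B =====
-- Source B's inner while loop; fuel f.length + 1 only makes it total (each pass shortens r)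
def modLoop (p_n inv : Int) (g : List Int) : Nat → List Int → List Int
  | 0, r => r
  | fuel + 1, r =>
    if r ≠ [] ∧ g.length ≤ r.length then
      let c := PySem.Int.mod (r.headD 0 * inv) p_n
      let r' := pyStrip (List.zipWith (fun a b => PySem.Int.mod (a - c * b) p_n) r.tail
                  (g.tail ++ List.replicate (r.length - g.length) 0))
      modLoop p_n inv g fuel r'
    else r

def mod_poli_alt (f : List Int) (g : List Int) (p_n : Int) : List Int :=
  -- g == [0] is Source B's ValueError raise, excluded by Pre_
  let r0 := pyStrip f
  let r := if r0 ≠ [] ∧ g.length ≤ r0.length then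
             modLoop p_n (pyInvMod (g.headD 0) p_n) g (f.length + 1) r0
           else r0
  if r = [] then [0] else r

-- ===== PRECONDITION & SPEC =====
-- Pre_ excludes exactly the inputs where A raises (g = [0]; g = [] with f ≠ [0]; a division
-- with zero or non-invertible leading coefficient) or loops forever (a division whose running
-- remainder gets leading coefficient ≡ 0 mod p_n, where A's resta_poli is a no-op), plus one
-- cited family on which A still returns: moduli p_n < 2 reaching the division (outside modular
-- arithmetic's intended domain; A raises or diverges there except for some negative moduli,
-- on which both programs return alike).
def Pre_mod_poli (f : List Int) (g : List Int) (p_n : Int) : Prop :=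
  g ≠ [0] ∧
  (f = [0] ∨ (g ≠ [] ∧
    (g.length ≤ f.length →
      (2 ≤ p_n ∧ g.headD 0 ≠ 0 ∧ Int.gcd (g.headD 0) p_n = 1 ∧
        PySem.Int.mod (f.headD 0) p_n ≠ 0))))
instance (f : List Int) (g : List Int) (p_n : Int) : Decidable (Pre_mod_poli f g p_n) := by
  unfold Pre_mod_poli; infer_instance

def pvWitness_mod_poli : List Int × List Int × Int := ([1, 2, 3], [1, 1], 5)

def Spec_mod_poli (f : List Int) (g : List Int) (p_n : Int) (out : List Int) : Prop := out = mod_poli_alt f g p_n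
instance (f : List Int) (g : List Int) (p_n : Int) (out : List Int) : Decidable (Spec_mod_poli f g p_n out) := by unfold Spec_mod_poli; infer_instance

-- ===== CLAIM (what is proved, stated in full; the proofs are below) =====
def Claim_equal_mod_poli : Prop := ∀ (f : List Int) (g : List Int) (p_n : Int), Dom_mod_poli f g p_n → Pre_mod_poli f g p_n → Spec_mod_poli f g p_n (mod_poli f g p_n)

-- ===== LEMMAS AND PROOFS =====

-- ---- pyStrip / pyFix basics ----
theorem pyStrip_cons_ne {x : Int} (l : List Int) (h : x ≠ 0) : pyStrip (x :: l) = x :: l := by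
  simp [pyStrip, h]

theorem pyStrip_cons_zero (l : List Int) : pyStrip (0 :: l) = pyStrip l := by
  simp [pyStrip]

theorem pyStrip_suffix (l : List Int) : pyStrip l <:+ l := by
  induction l with
  | nil => simp [pyStrip]
  | cons x t ih =>
    by_cases h : x = 0
    · simpa [pyStrip, h] using ih.trans (List.suffix_cons x t)
    · simp [pyStrip, h]

theorem pyStrip_ne_head {l : List Int} {x : Int} {t : List Int} (h : pyStrip l = x :: t) :
    x ≠ 0 := by
  induction l with
  | nil => simp [pyStrip] at h
  | cons y u ih =>
    by_cases hy : y = 0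
    · rw [hy, pyStrip_cons_zero] at h; exact ih h
    · rw [pyStrip_cons_ne u hy] at h
      injection h with h1 _
      exact h1 ▸ hy

theorem pyStrip_noop {l : List Int} (h : l = [] ∨ l.headD 0 ≠ 0) : pyStrip l = l := by
  cases l with
  | nil => simp [pyStrip]
  | cons x t =>
    rcases h with h | h
    · cases h
    · exact pyStrip_cons_ne t (by simpa using h)

theorem pyFix_ne {l : List Int} (h : l ≠ []) : pyFix l = l := by simp [pyFix, h]

-- ---- modular arithmetic on PySem.Int.mod ----
theorem pmod_emod {x p : Int} (hp : 0 < p) : PySem.Int.mod x p = x % p :=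
  PySem.Int.mod_eq_emod_of_pos hp

theorem pmod_zero {p : Int} (hp : 0 < p) : PySem.Int.mod 0 p = 0 := by
  rw [pmod_emod hp]; simp

theorem pmod_pmod {x p : Int} (hp : 0 < p) :
    PySem.Int.mod (PySem.Int.mod x p) p = PySem.Int.mod x p := by
  rw [pmod_emod hp, pmod_emod hp]; exact Int.emod_emod_of_dvd x dvd_rfl

theorem pmod_sub_pmod {a b p : Int} (hp : 0 < p) :
    PySem.Int.mod (a - PySem.Int.mod b p) p = PySem.Int.mod (a - b) p := by
  rw [pmod_emod hp, pmod_emod hp, pmod_emod hp]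
  conv_rhs => rw [Int.sub_emod]
  rw [Int.sub_emod a (b % p)]
  rw [Int.emod_emod_of_dvd b dvd_rfl]

-- Python's pow(a, -1, p) really is a modular inverse (p ≥ 2, gcd(a,p) = 1)
theorem pyInvMod_spec {a p : Int} (hp : 2 ≤ p) (h : Int.gcd a p = 1) :
    a * pyInvMod a p ≡ 1 [ZMOD p] := by
  have hp0 : 0 < p := by omega
  have hpne : p ≠ 0 := by omega
  have hme : PySem.Int.mod a p = a % p := pmod_emod hp0
  have hm0 : 0 ≤ PySem.Int.mod a p := by rw [hme]; exact Int.emod_nonneg a hpne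
  have hgcd : Int.gcd (PySem.Int.mod a p) p = 1 := by
    rw [hme, Int.emod_def]
    have hrw : a - p * (a / p) = a + p * (-(a / p)) := by ring
    rw [hrw, Int.gcd_add_mul_left_left]
    exact h
  have hcastm : ((PySem.Int.mod a p).natAbs : Int) = PySem.Int.mod a p :=
    Int.natAbs_of_nonneg hm0
  have hcastp : (p.natAbs : Int) = p := Int.natAbs_of_nonneg (le_of_lt hp0)
  have hbez := Nat.gcd_eq_gcd_ab (PySem.Int.mod a p).natAbs p.natAbs
  have hg1 : (((PySem.Int.mod a p).natAbs.gcd p.natAbs : Nat) : Int) = 1 := by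
    have h2 : Int.gcd (PySem.Int.mod a p) p = (PySem.Int.mod a p).natAbs.gcd p.natAbs := rfl
    rw [h2] at hgcd
    exact_mod_cast hgcd
  rw [hg1, hcastm, hcastp] at hbez
  have hMA : PySem.Int.mod a p * Nat.gcdA (PySem.Int.mod a p).natAbs p.natAbs ≡ 1 [ZMOD p] := by
    show PySem.Int.mod a p * Nat.gcdA (PySem.Int.mod a p).natAbs p.natAbs % p = 1 % p
    conv_rhs => rw [hbez]
    rw [Int.add_mul_emod_self_left]
  have hAm : pyInvMod a p ≡ Nat.gcdA (PySem.Int.mod a p).natAbs p.natAbs [ZMOD p] := by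
    show pyInvMod a p % p = Nat.gcdA (PySem.Int.mod a p).natAbs p.natAbs % p
    unfold pyInvMod
    rw [pmod_emod hp0]
    exact Int.emod_emod_of_dvd _ dvd_rfl
  have ham : a ≡ PySem.Int.mod a p [ZMOD p] := by
    show a % p = PySem.Int.mod a p % p
    rw [hme]
    exact (Int.emod_emod_of_dvd a dvd_rfl).symm
  exact (ham.mul hAm).trans hMA

-- the coefficient c = (r0 * inv) % p cancels the leading term: c * g0 ≡ r0 (mod p)
theorem step_core {p g0 r0 : Int} (hp : 2 ≤ p)
    (hinv : g0 * pyInvMod g0 p ≡ 1 [ZMOD p]) :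
    PySem.Int.mod (r0 * pyInvMod g0 p) p * g0 ≡ r0 [ZMOD p] := by
  have hp0 : 0 < p := by omega
  have h1 : PySem.Int.mod (r0 * pyInvMod g0 p) p ≡ r0 * pyInvMod g0 p [ZMOD p] := by
    rw [pmod_emod hp0, Int.ModEq]
    exact Int.emod_emod_of_dvd _ dvd_rfl
  calc PySem.Int.mod (r0 * pyInvMod g0 p) p * g0
      ≡ r0 * pyInvMod g0 p * g0 [ZMOD p] := h1.mul_right g0
    _ = r0 * (g0 * pyInvMod g0 p) := by ring
    _ ≡ r0 * 1 [ZMOD p] := Int.ModEq.mul_left r0 hinv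
    _ = r0 := by ring

theorem coef_ne {p g0 r0 : Int} (hp : 2 ≤ p)
    (hinv : g0 * pyInvMod g0 p ≡ 1 [ZMOD p])
    (hr : PySem.Int.mod r0 p ≠ 0) :
    PySem.Int.mod (r0 * pyInvMod g0 p) p ≠ 0 := by
  have hp0 : 0 < p := by omega
  intro h
  apply hr
  have hc := step_core (r0 := r0) hp hinv
  rw [h, zero_mul] at hc
  have : (0 : Int) % p = r0 % p := hc
  rw [pmod_emod hp0, ← this]
  simp

theorem head_cancel {p g0 r0 : Int} (hp : 2 ≤ p)
    (hinv : g0 * pyInvMod g0 p ≡ 1 [ZMOD p]) :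
    PySem.Int.mod (r0 - PySem.Int.mod (r0 * pyInvMod g0 p) p * g0) p = 0 := by
  have hp0 : 0 < p := by omega
  have hc := step_core (r0 := r0) hp hinv
  have : r0 - PySem.Int.mod (r0 * pyInvMod g0 p) p * g0 ≡ r0 - r0 [ZMOD p] :=
    (Int.ModEq.refl r0).sub hc
  rw [sub_self] at this
  rw [pmod_emod hp0]
  have h0 : (r0 - PySem.Int.mod (r0 * pyInvMod g0 p) p * g0) % p = 0 % p := this
  simpa using h0

theorem head_eq_mod {p g0 r0 : Int} (hp : 2 ≤ p)
    (hinv : g0 * pyInvMod g0 p ≡ 1 [ZMOD p]) :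
    PySem.Int.mod (PySem.Int.mod (r0 * pyInvMod g0 p) p * g0) p = PySem.Int.mod r0 p := by
  have hp0 : 0 < p := by omega
  have hc : PySem.Int.mod (r0 * pyInvMod g0 p) p * g0 % p = r0 % p :=
    step_core (r0 := r0) hp hinv
  rw [pmod_emod hp0, pmod_emod hp0, pmod_emod hp0]
  rw [pmod_emod hp0] at hc
  exact hc

-- ---- list plumbing ----
theorem mem_zipWith {F : Int → Int → Int} :
    ∀ {as bs : List Int} {x : Int}, x ∈ List.zipWith F as bs → ∃ a b, x = F a b := by
  intro as
  induction as with
  | nil => intro bs x h; simp at h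
  | cons a as ih =>
    intro bs x h
    cases bs with
    | nil => simp at h
    | cons b bs =>
      rw [List.zipWith_cons_cons] at h
      rcases List.mem_cons.mp h with h | h
      · exact ⟨a, b, h⟩
      · exact ih h

theorem map_range_getD_eq_zipWith (F : Int → Int → Int) (as : List Int) :
    ∀ bs : List Int, as.length = bs.length →
      (List.range as.length).map (fun i => F (as.getD i 0) (bs.getD i 0))
        = List.zipWith F as bs := by
  induction as with
  | nil => intro bs h; simp
  | cons a as ih =>
    intro bs h
    cases bs with
    | nil => simp at h
    | cons b bs =>
      have hlen : as.length = bs.length := by simpa using h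
      simp only [List.length_cons, List.range_succ_eq_map, List.map_cons, List.map_map,
        List.getD_cons_zero, List.zipWith_cons_cons]
      refine congrArg (F a b :: ·) ?_
      have := ih bs hlen
      simpa [Function.comp_def, List.getD_cons_succ] using this

theorem foldl_id {α β : Type} (f : α → β → α) (l : List β) (a : α) (h : ∀ x b, f x b = x) :
    l.foldl f a = a := by
  induction l generalizing a with
  | nil => rfl
  | cons b l ih => rw [List.foldl_cons, h]; exact ih a

theorem getD_rep0 (k i : Nat) : (List.replicate k (0 : Int)).getD i 0 = 0 := by
  by_cases h : i < k
  · exact List.getD_replicate 0 h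
  · rw [List.getD_eq_getElem?_getD, List.getElem?_eq_none (by simpa using le_of_not_gt h)]
    rfl

theorem set_getD_self (l : List Int) (m : Nat) : l.set m (l.getD m 0) = l := by
  by_cases h : m < l.length
  · rw [List.getD_eq_getElem l 0 h]; exact List.set_getElem_self h
  · exact List.set_eq_of_length_le (le_of_not_gt h)

theorem getD_set (l : List Int) (i k : Nat) (v : Int) :
    (l.set i v).getD k 0 = if i = k ∧ i < l.length then v else l.getD k 0 := by
  rw [List.getD_eq_getElem?_getD, List.getD_eq_getElem?_getD, List.getElem?_set]
  by_cases h1 : i = k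
  · subst h1
    by_cases h2 : i < l.length <;> simp [h2]
  · simp [h1]

theorem fold_set_spec (F : Nat → Int) (m : Nat) (acc : List Int) :
    ((List.range m).foldl (fun a j => a.set j (a.getD j 0 + F j)) acc).length = acc.length ∧
    ∀ k : Nat, ((List.range m).foldl (fun a j => a.set j (a.getD j 0 + F j)) acc).getD k 0 =
      if k < m ∧ k < acc.length then acc.getD k 0 + F k else acc.getD k 0 := by
  induction m with
  | zero => simp
  | succ m ih =>
    obtain ⟨hlen, hget⟩ := ih
    rw [List.range_succ, List.foldl_append]
    simp only [List.foldl_cons, List.foldl_nil]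
    refine ⟨by rw [List.length_set, hlen], ?_⟩
    intro k
    rw [getD_set, hlen, hget m, hget k]
    by_cases h1 : m = k
    · subst h1
      by_cases h2 : m < acc.length
      · simp [h2]
      · simp [h2]
    · by_cases h2 : k < acc.length <;> by_cases h3 : k < m <;>
        simp [h1, h2, h3] <;> omega

-- multiplying the quotient term [c, 0, …, 0] by g in A's mult_poli is just a scaled shift of g
theorem mult_poli_shift {p c : Int} {k : Nat} {g : List Int} (hp : 0 < p)
    (hg : g ≠ []) (hgz : g ≠ [0]) (hc : c ≠ 0) (hcp : PySem.Int.mod c p = c)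
    (hhead : PySem.Int.mod (c * g.headD 0) p ≠ 0) (hne1 : ¬(c = 1 ∧ k = 0)) :
    mult_poli (c :: List.replicate k 0) g p
      = g.map (fun x => PySem.Int.mod (c * x) p) ++ List.replicate k 0 := by
  obtain ⟨g0, gt, rfl⟩ := List.exists_cons_of_ne_nil hg
  have hf0 : ¬(c :: List.replicate k 0 = [0] ∨ g0 :: gt = [0]) := by
    rintro (h | h)
    · injection h with h1 _; exact hc h1
    · exact hgz h
  have hf1 : c :: List.replicate k 0 ≠ [1] := by
    intro h
    injection h with h1 h2
    exact hne1 ⟨h1, by simpa using congrArg List.length h2⟩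
  by_cases hgone : g0 :: gt = [1]
  · -- Python's "if g == [1]: return f" branch: f is c :: 0…0, already reduced (hcp)
    unfold mult_poli
    rw [if_neg hf0, if_neg hf1, if_pos hgone]
    injection hgone with h1 h2
    subst h1; subst h2
    simp [hcp]
  · unfold mult_poli
    rw [if_neg hf0, if_neg hf1, if_neg hgone]
    simp only []
    set l2 : Nat := (g0 :: gt).length with hl2
    have hlrw : (c :: List.replicate k 0).length + l2 - 1 = l2 + k := by
      simp [hl2]; omega
    rw [hlrw]
    have hlen1 : (c :: List.replicate k 0).length = k + 1 := by simp
    rw [hlen1, List.range_succ_eq_map, List.foldl_cons]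
    -- the i = 0 pass: accumulate c * g[j] at position j
    have hspec := fold_set_spec (fun j => c * (g0 :: gt).getD j 0) l2
      (List.replicate (l2 + k) 0)
    -- the inner fold for i = 0 matches fold_set_spec's shape
    have hmatch : (List.range l2).foldl
        (fun acc j => acc.set (0 + j)
          (acc.getD (0 + j) 0 + (c :: List.replicate k 0).getD 0 0 * (g0 :: gt).getD j 0))
        (List.replicate (l2 + k) 0)
        = (List.range l2).foldl
            (fun a j => a.set j (a.getD j 0 + c * (g0 :: gt).getD j 0))
            (List.replicate (l2 + k) 0) := by
      simp
    rw [hmatch]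
    set R := (List.range l2).foldl
      (fun a j => a.set j (a.getD j 0 + c * (g0 :: gt).getD j 0))
      (List.replicate (l2 + k) 0) with hR
    obtain ⟨hRlen, hRget⟩ := hspec
    -- the remaining passes multiply by f[i] = 0 and change nothing
    have hrest : (List.map Nat.succ (List.range k)).foldl
        (fun acc i => (List.range l2).foldl
          (fun acc j => acc.set (i + j)
            (acc.getD (i + j) 0 + (c :: List.replicate k 0).getD i 0 * (g0 :: gt).getD j 0))
          acc) R = R := by
      rw [List.foldl_map]
      apply foldl_id
      intro x i
      apply foldl_id
      intro y j
      rw [List.getD_cons_succ, getD_rep0, zero_mul, add_zero, set_getD_self]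
    rw [hrest]
    -- identify R with the scaled shift of g
    have hRval : R = (g0 :: gt).map (fun x => c * x) ++ List.replicate k 0 := by
      apply List.ext_getElem
      · rw [hRlen]; simp [hl2]; omega
      · intro i h1 h2
        have hilt : i < l2 + k := by rw [hRlen] at h1; simpa using h1
        have : R.getD i 0 = R[i] := List.getD_eq_getElem R 0 h1
        rw [← this, hRget i]
        simp only [List.length_replicate, hilt, and_true]
        by_cases hi : i < l2
        · rw [if_pos hi, getD_rep0,
            List.getElem_append_left (by simpa [hl2] using hi),
            List.getElem_map, zero_add,
            List.getD_eq_getElem _ 0 (by simpa [hl2] using hi)]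
        · rw [if_neg hi, getD_rep0,
            List.getElem_append_right (by simpa [hl2] using le_of_not_gt hi),
            List.getElem_replicate]
    rw [hRval]
    -- apply the % p comprehension, then strip/fix are no-ops (head ≠ 0)
    rw [List.map_append, List.map_map]
    have hmaprep : (List.replicate k (0 : Int)).map (fun x => PySem.Int.mod x p)
        = List.replicate k 0 := by
      rw [List.map_replicate, pmod_zero hp]
    rw [hmaprep]
    have hcomp : ((g0 :: gt).map ((fun x => PySem.Int.mod x p) ∘ fun x => c * x))
        = (g0 :: gt).map (fun x => PySem.Int.mod (c * x) p) := by
      simp [Function.comp_def]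
    rw [hcomp, List.map_cons]
    rw [List.cons_append]
    rw [pyStrip_cons_ne _ (by simpa using hhead)]
    rw [pyFix_ne (by simp)]

-- A's resta_poli on two equal-length lists is a zipWith followed by strip/fix
theorem resta_eq (p : Int) (r aux : List Int) (hlen : aux.length = r.length)
    (haux : aux ≠ [0]) :
    resta_poli r aux p
      = pyFix (pyStrip (List.zipWith (fun a b => PySem.Int.mod (a - b) p) r aux)) := by
  unfold resta_poli
  rw [if_neg haux]
  simp only [hlen, lt_irrefl, if_false, max_self]
  exact congrArg (fun l => pyFix (pyStrip l))
    (map_range_getD_eq_zipWith (fun a b => PySem.Int.mod (a - b) p) r aux hlen.symm)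

-- pointwise: subtracting a pre-reduced multiple equals subtracting the raw multiple
theorem zipWith_rep0 (p c : Int) : ∀ (rs : List Int) (k : Nat),
    List.zipWith (fun a b => PySem.Int.mod (a - b) p) rs (List.replicate k 0)
      = List.zipWith (fun a b => PySem.Int.mod (a - c * b) p) rs (List.replicate k 0) := by
  intro rs
  induction rs with
  | nil => intro k; simp
  | cons r rs ih =>
    intro k
    cases k with
    | zero => simp
    | succ k =>
      rw [List.replicate_succ, List.zipWith_cons_cons, List.zipWith_cons_cons, ih]
      norm_num

theorem zipWith_mod_sub (p c : Int) (hp : 0 < p) : ∀ (gs rs : List Int) (k : Nat),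
    List.zipWith (fun a b => PySem.Int.mod (a - b) p) rs
        (gs.map (fun x => PySem.Int.mod (c * x) p) ++ List.replicate k 0)
      = List.zipWith (fun a b => PySem.Int.mod (a - c * b) p) rs
          (gs ++ List.replicate k 0) := by
  intro gs
  induction gs with
  | nil => intro rs k; simpa using zipWith_rep0 p c rs k
  | cons x gs ih =>
    intro rs k
    cases rs with
    | nil => simp
    | cons r rs =>
      simp only [List.map_cons, List.cons_append, List.zipWith_cons_cons]
      rw [pmod_sub_pmod hp, ih]

-- one pass of A's division loop body equals one pass of B's
theorem step_eq {p : Int} {g r : List Int} (hp : 2 ≤ p) (hg : g ≠ [])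
    (hg0 : g.headD 0 ≠ 0) (hgcd : Int.gcd (g.headD 0) p = 1)
    (hr : r ≠ []) (hr0 : PySem.Int.mod (r.headD 0) p ≠ 0) (hlen : g.length ≤ r.length) :
    resta_poli r (mult_poli (pyFix (pyStrip (PySem.Int.mod (r.headD 0 * pyInvMod (g.headD 0) p) p :: List.replicate (r.length - g.length) 0))) g p) p
      = pyFix (pyStrip (List.zipWith
          (fun a b => PySem.Int.mod (a - PySem.Int.mod (r.headD 0 * pyInvMod (g.headD 0) p) p * b) p)
          r.tail (g.tail ++ List.replicate (r.length - g.length) 0))) := by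
  have hp0 : 0 < p := by omega
  obtain ⟨g0, gt, rfl⟩ := List.exists_cons_of_ne_nil hg
  obtain ⟨r0, rt, rfl⟩ := List.exists_cons_of_ne_nil hr
  simp only [List.headD_cons] at hr0 hg0 hgcd ⊢
  have hinv : g0 * pyInvMod g0 p ≡ 1 [ZMOD p] := pyInvMod_spec hp hgcd
  set c : Int := PySem.Int.mod (r0 * pyInvMod g0 p) p with hcdef
  set k : Nat := (r0 :: rt).length - (g0 :: gt).length with hkdef
  have hcne : c ≠ 0 := coef_ne hp hinv hr0
  have hcp : PySem.Int.mod c p = c := pmod_pmod hp0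
  have hgz : g0 :: gt ≠ [0] := by intro h; injection h with h1 _; exact hg0 h1
  rw [pyStrip_cons_ne _ hcne, pyFix_ne (by simp)]
  by_cases hsp : c = 1 ∧ k = 0
  · obtain ⟨hc1, hk0⟩ := hsp
    have hmult : mult_poli [1] (g0 :: gt) p = g0 :: gt := by
      unfold mult_poli
      rw [if_neg (by simp [hgz]), if_pos rfl]
    rw [hc1, hk0, show List.replicate 0 (0 : Int) = [] from rfl,
      show ((1 : Int) :: [] : List Int) = [1] from rfl, hmult]
    have hlg : (g0 :: gt).length = (r0 :: rt).length := by
      have := hkdef ▸ hk0; omega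
    rw [resta_eq p _ _ hlg hgz]
    rw [List.zipWith_cons_cons]
    have hhead0 : PySem.Int.mod (r0 - g0) p = 0 := by
      have := head_cancel (r0 := r0) hp hinv
      rw [← hcdef, hc1, one_mul] at this
      exact this
    rw [hhead0, pyStrip_cons_zero]
    simp only [List.tail_cons, List.append_nil, one_mul]
  · have hhead : PySem.Int.mod (c * g0) p ≠ 0 := by
      rw [← hcdef] at *
      rw [head_eq_mod hp hinv]; exact hr0
    have hmult := mult_poli_shift (k := k) hp0 (by simp) hgz hcne hcp
      (by simpa using hhead) hsp
    rw [hmult]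
    have hlaux : ((g0 :: gt).map (fun x => PySem.Int.mod (c * x) p)
        ++ List.replicate k 0).length = (r0 :: rt).length := by
      have hl := hlen
      simp only [List.length_cons] at hl
      simp [hkdef]
      omega
    have hauxz : (g0 :: gt).map (fun x => PySem.Int.mod (c * x) p)
        ++ List.replicate k 0 ≠ [0] := by
      rw [List.map_cons, List.cons_append]
      intro h; injection h with h1 _; exact hhead h1
    rw [resta_eq p _ _ hlaux hauxz]
    rw [List.map_cons, List.cons_append, List.zipWith_cons_cons]
    have hhead0 : PySem.Int.mod (r0 - PySem.Int.mod (c * g0) p) p = 0 := by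
      rw [pmod_sub_pmod hp0]
      exact head_cancel hp hinv
    rw [hhead0, pyStrip_cons_zero]
    rw [zipWith_mod_sub p c hp0]
    simp only [List.tail_cons]

-- heads produced by a pass of B's loop are already reduced and nonzero
theorem strip_zip_inv {p : Int} (hp : 0 < p) (c : Int) (rs bs : List Int) :
    pyStrip (List.zipWith (fun a b => PySem.Int.mod (a - c * b) p) rs bs) = [] ∨
      PySem.Int.mod
        ((pyStrip (List.zipWith (fun a b => PySem.Int.mod (a - c * b) p) rs bs)).headD 0) p ≠ 0 := by
  cases hL : pyStrip (List.zipWith (fun a b => PySem.Int.mod (a - c * b) p) rs bs) with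
  | nil => exact Or.inl rfl
  | cons x t =>
    right
    have hx : x ≠ 0 := pyStrip_ne_head hL
    have hmem : x ∈ List.zipWith (fun a b => PySem.Int.mod (a - c * b) p) rs bs :=
      (pyStrip_suffix _).subset (hL ▸ List.mem_cons_self)
    obtain ⟨a, b, rfl⟩ := mem_zipWith hmem
    simpa [pmod_pmod hp] using hx

theorem modLoop_nil (p inv : Int) (g : List Int) : ∀ fuel : Nat, modLoop p inv g fuel [] = [] := by
  intro fuel
  cases fuel with
  | zero => rfl
  | succ fuel => simp [modLoop]

theorem modLoop_shape {p : Int} (hp : 0 < p) (inv : Int) (g : List Int) :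
    ∀ (fuel : Nat) (r : List Int), (r = [] ∨ PySem.Int.mod (r.headD 0) p ≠ 0) →
      (modLoop p inv g fuel r = [] ∨
        PySem.Int.mod ((modLoop p inv g fuel r).headD 0) p ≠ 0) := by
  intro fuel
  induction fuel with
  | zero => intro r hr; exact hr
  | succ fuel ih =>
    intro r hr
    rw [modLoop]
    split
    · exact ih _ (strip_zip_inv hp _ _ _)
    · exact hr

-- the two loops stay in lockstep: A's remainder is pyFix of B's
theorem loop_eq {p : Int} {g : List Int} (hp : 2 ≤ p) (hg : g ≠ [])
    (hg0 : g.headD 0 ≠ 0) (hgcd : Int.gcd (g.headD 0) p = 1) :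
    ∀ (fuel : Nat) (q r : List Int), (r = [] ∨ PySem.Int.mod (r.headD 0) p ≠ 0) →
      (divLoop p g fuel q (pyFix r)).2
        = pyFix (modLoop p (pyInvMod (g.headD 0) p) g fuel r) := by
  have hp0 : 0 < p := by omega
  intro fuel
  induction fuel with
  | zero => intro q r _; simp [divLoop, modLoop]
  | succ fuel ih =>
    intro q r hr
    rcases hr with rfl | hr0
    · rw [modLoop_nil]
      have : pyFix ([] : List Int) = [0] := rfl
      rw [this, divLoop]
      rw [if_neg (by simp)]
    · have hrne : r ≠ [] := by
        intro h; subst h; simp only [List.headD_nil] at hr0; exact hr0 (pmod_zero hp0)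
      rw [pyFix_ne hrne]
      by_cases hlen : g.length ≤ r.length
      · have hrz : r ≠ [0] := by
          intro h; subst h; simp only [List.headD_cons] at hr0; exact hr0 (pmod_zero hp0)
        rw [divLoop, if_pos ⟨hrz, hlen⟩, modLoop, if_pos ⟨hrne, hlen⟩]
        simp only []
        rw [step_eq hp hg hg0 hgcd hrne hr0 hlen]
        exact ih _ _ (strip_zip_inv hp0 _ _ _)
      · rw [divLoop, if_neg (by tauto), modLoop, if_neg (by tauto)]
        exact (pyFix_ne hrne).symm

-- ===== VERDICT (by name: the statement is the Claim_ definition above) =====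
theorem mod_poli_spec : Claim_equal_mod_poli := by
  unfold Claim_equal_mod_poli
  intro f g p _hD hpre
  obtain ⟨hgz, hrest⟩ := hpre
  unfold Spec_mod_poli mod_poli mod_poli_alt div_poli
  dsimp only
  by_cases hfz : f = [0]
  · -- f = [0]: both sides are [0] whatever g and p are
    subst hfz
    have hB : pyStrip [(0 : Int)] = [] := by simp [pyStrip]
    by_cases hlen : g.length ≤ ([0] : List Int).length
    · have hA : (divLoop p g (([0] : List Int).length + 1) [0] [0]).2 = [0] := by
        rw [divLoop, if_neg (by simp)]
      rw [if_pos hlen, hA, hB]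
      simp [pyFix]
    · rw [if_neg hlen, hB]
      simp [pyFix]
  · rcases hrest with rfl | ⟨hg, hdiv⟩
    · exact absurd rfl hfz
    · by_cases hlen : g.length ≤ f.length
      · obtain ⟨hp, hg0, hgcd, hf0⟩ := hdiv hlen
        have hp0 : 0 < p := by omega
        have hfne : f ≠ [] := by
          intro h; subst h
          cases g with
          | nil => exact hg rfl
          | cons a t => simp at hlen
        have hfhead : f.headD 0 ≠ 0 := by
          intro h; rw [h] at hf0; exact hf0 (pmod_zero hp0)
        have hstrip : pyStrip f = f := pyStrip_noop (Or.inr hfhead)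
        have hcond : ¬f = [] ∧ g.length ≤ f.length := ⟨hfne, hlen⟩
        rw [hstrip, if_pos hlen, if_pos hcond]
        have hloop := loop_eq hp hg hg0 hgcd (f.length + 1) [0] f (Or.inr hf0)
        rw [pyFix_ne hfne] at hloop
        rw [hloop]
        have hM := modLoop_shape hp0 (pyInvMod (g.headD 0) p) g (f.length + 1) f
          (Or.inr hf0)
        set M := modLoop p (pyInvMod (g.headD 0) p) g (f.length + 1) f with hMdef
        rcases hM with h | h
        · rw [h]
          simp [pyFix, pyStrip]
        · have hMne : M ≠ [] := by
            intro hh; rw [hh] at h; simp only [List.headD_nil] at h; exact h (pmod_zero hp0)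
          have hhne : M.headD 0 ≠ 0 := by
            intro hh; rw [hh] at h; exact h (pmod_zero hp0)
          rw [pyFix_ne hMne, pyStrip_noop (Or.inr hhne), pyFix_ne hMne, if_neg hMne]
      · -- no division on either side: both reduce to pyFix (pyStrip f)
        rw [if_neg hlen]
        have hlen' : ¬ g.length ≤ (pyStrip f).length := by
          have := (pyStrip_suffix f).length_le
          omega
        have hni : ¬(pyStrip f ≠ [] ∧ g.length ≤ (pyStrip f).length) := fun h => hlen' h.2
        rw [if_neg hni]
        simp [pyFix]
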